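-- pv_equiv track=rewrite | github.com/QResourse/VM-ETL | Modules/PCFunc.py | getGeneralReportData
-- ===== SOURCE A (Python) =====
-- def getGeneralReportData(rows):
--   index = 0
--   GeneralData = []
--   while(index < len(rows)):
--     if (rows[index][0] == "RESULTS"):
--       break
--     else:
--       GeneralData.append(rows[index])
--     index+=1
--   return GeneralData
-- ===== SOURCE B (Python) =====
-- def getGeneralReportData(rows):
--     index = next((i for i, row in enumerate(rows) if row[0] == "RESULTS"), len(rows))
--     return rows[:index]
-- ===== Notes on version B (the rewrite author's own statement) =====
-- stated objective: idiomatic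
-- what changed: B first finds the cutoff index of the first row whose head is "RESULTS" (defaulting to len(rows)) and returns one slice, instead of A's index-while-loop that appends row by row until the marker.
import Mathlib
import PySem

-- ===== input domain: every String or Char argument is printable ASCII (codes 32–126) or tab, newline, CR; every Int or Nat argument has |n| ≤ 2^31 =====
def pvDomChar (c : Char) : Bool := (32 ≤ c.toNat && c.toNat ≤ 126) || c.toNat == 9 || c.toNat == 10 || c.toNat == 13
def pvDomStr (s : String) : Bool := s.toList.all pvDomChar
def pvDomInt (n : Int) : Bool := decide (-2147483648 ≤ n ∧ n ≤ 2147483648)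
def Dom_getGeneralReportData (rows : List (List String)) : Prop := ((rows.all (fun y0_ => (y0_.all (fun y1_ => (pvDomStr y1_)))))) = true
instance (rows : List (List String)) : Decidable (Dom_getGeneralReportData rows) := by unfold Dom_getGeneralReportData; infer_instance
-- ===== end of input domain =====

-- B finds the cutoff index of the first "RESULTS"-headed row and returns one slice,
-- instead of A's while-loop appending row by row (objective: idiomatic decomposition).


-- ===== PORT A =====
-- A's while-loop over the index, transcribed as structural recursion over the rows:
-- test rows[index][0] (pyGet?; none = IndexError, excluded by Pre_), break on the marker,
-- otherwise append the row and advance.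
def getGeneralReportData (rows : List (List String)) : List (List String) :=
  match rows with
  | [] => []
  | r :: rs =>
    if PySem.List.pyGet? r 0 == some "RESULTS" then []
    else r :: getGeneralReportData rs

-- ===== PORT B =====
-- B: find the index of the first row whose row[0] is "RESULTS" (default: length), then slice.
def getGeneralReportData_alt (rows : List (List String)) : List (List String) :=
  let index := (rows.findIdx? (fun r => PySem.List.pyGet? r 0 == some "RESULTS")).getD rows.length
  rows.take index

-- ===== PRECONDITION & SPEC =====
-- Pre_ excludes inputs with an empty row before the first "RESULTS" marker: there both
-- Pythons raise IndexError on row[0].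
def Pre_getGeneralReportData (rows : List (List String)) : Prop :=
  [] ∉ rows.takeWhile (fun r => !(r.head? == some "RESULTS"))
instance (rows : List (List String)) : Decidable (Pre_getGeneralReportData rows) := by unfold Pre_getGeneralReportData; infer_instance

def pvWitness_getGeneralReportData : List (List String) := [["a", "b"], ["RESULTS"], [], ["c"]]

def Spec_getGeneralReportData (rows : List (List String)) (out : List (List String)) : Prop := out = getGeneralReportData_alt rows
instance (rows : List (List String)) (out : List (List String)) : Decidable (Spec_getGeneralReportData rows out) := by unfold Spec_getGeneralReportData; infer_instance

-- ===== CLAIM (what is proved, stated in full; the proofs are below) =====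
def Claim_equal_getGeneralReportData : Prop := ∀ (rows : List (List String)), Dom_getGeneralReportData rows → Pre_getGeneralReportData rows → Spec_getGeneralReportData rows (getGeneralReportData rows)

-- ===== LEMMAS AND PROOFS =====

theorem getGeneralReportData_eq (rows : List (List String))
    (h : Pre_getGeneralReportData rows) :
    getGeneralReportData rows = getGeneralReportData_alt rows := by
  induction rows with
  | nil => rfl
  | cons r rs ih =>
    by_cases hm : PySem.List.pyGet? r 0 = some "RESULTS"
    · have hh : r.head? = some "RESULTS" := by
        cases r with
        | nil => simp [PySem.List.pyGet?] at hm
        | cons x xs =>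
          simp at hm
          simp [hm]
      simp [getGeneralReportData, getGeneralReportData_alt, hm, List.findIdx?_cons]
    · have hh : ¬ r.head? = some "RESULTS" := by
        cases r with
        | nil => simp
        | cons x xs =>
          intro hc
          simp at hc
          exact hm (by simp [hc])
      have hpre : Pre_getGeneralReportData rs := by
        unfold Pre_getGeneralReportData at h ⊢
        rw [List.takeWhile_cons, if_pos (by simp [hh])] at h
        simp at h
        exact h.2
      have halt : getGeneralReportData_alt (r :: rs) = r :: getGeneralReportData_alt rs := by
        simp only [getGeneralReportData_alt, List.findIdx?_cons, beq_iff_eq, hm, if_false]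
        cases rs.findIdx? (fun r => PySem.List.pyGet? r 0 == some "RESULTS") with
        | none => simp
        | some k => simp
      rw [halt]
      simp only [getGeneralReportData, beq_iff_eq, hm, if_false]
      exact congrArg (r :: ·) (ih hpre)

-- ===== VERDICT (by name: the statement is the Claim_ definition above) =====
theorem getGeneralReportData_spec : Claim_equal_getGeneralReportData := by
  intro rows _ hp
  exact getGeneralReportData_eq rows hp
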